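-- pv_equiv track=rewrite | github.com/c2002f/Edit-Distance-Alg | edit_distance.py | stringAlignment
-- ===== SOURCE A (Python) =====
-- def stringAlignment(n, m, shortestMatch):
--     #str1 represents the longer string if one is present
--     #if equal length, then the first given string stays as first string
--     if len(n) >= len(m):
--         str1 = n
--         str2 = m
--     elif len(n) < len(m):
--         str1 = m
--         str2 = n
--
--     # Remove the leading space from str1 for correct alignment
--     alignment = str1 + "\n"
--     subAlignment = []  # this will store the aligned string
--     usedChar = set()   # to ensure we do not reuse the same index
--
--     # Skip the first character (space) from the alignment process
--     j = 0
--     for i in range(1, len(str1)):  # Start at index 1 to skip the first space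
--         match = False
--         for j in range(len(str2)):
--             if str1[i] == str2[j] and j not in usedChar and j in shortestMatch:
--                 subAlignment.append(str2[j])  # Append matching characters
--                 usedChar.add(j)  # Mark this index as used
--                 match = True
--                 j+=1
--                 break  # Avoid duplicate matches
--         if not match:
--             subAlignment.append("_")  # If no match, append '_'
--
--     # convert subAlignment to string and add to alignment
--     alignment += " "+''.join(subAlignment)
--
--     return alignment
-- ===== SOURCE B (Python) =====
-- def stringAlignment(n, m, shortestMatch):
--     # Per-character budget of eligible str2 indices, built once; each position of
--     # str1[1:] consumes one unit if available — O(n+m) instead of A's rescan per char.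
--     if len(n) >= len(m):
--         str1, str2 = n, m
--     else:
--         str1, str2 = m, n
--     allowed = set(shortestMatch)
--     avail = {}
--     for j, ch in enumerate(str2):
--         if j in allowed:
--             avail[ch] = avail.get(ch, 0) + 1
--     out = []
--     for ch in str1[1:]:
--         if avail.get(ch, 0) > 0:
--             avail[ch] -= 1
--             out.append(ch)
--         else:
--             out.append("_")
--     return str1 + "\n" + " " + "".join(out)
-- ===== Notes on version B (the rewrite author's own statement) =====
-- stated objective: faster
-- what changed: Instead of rescanning str2 from the start for every position of str1 and maintaining a set of used indices, B precomputes a per-character counter of eligible str2 indices (those in shortestMatch) in one pass and then consumes one unit per matching str1 position.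
import Mathlib
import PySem

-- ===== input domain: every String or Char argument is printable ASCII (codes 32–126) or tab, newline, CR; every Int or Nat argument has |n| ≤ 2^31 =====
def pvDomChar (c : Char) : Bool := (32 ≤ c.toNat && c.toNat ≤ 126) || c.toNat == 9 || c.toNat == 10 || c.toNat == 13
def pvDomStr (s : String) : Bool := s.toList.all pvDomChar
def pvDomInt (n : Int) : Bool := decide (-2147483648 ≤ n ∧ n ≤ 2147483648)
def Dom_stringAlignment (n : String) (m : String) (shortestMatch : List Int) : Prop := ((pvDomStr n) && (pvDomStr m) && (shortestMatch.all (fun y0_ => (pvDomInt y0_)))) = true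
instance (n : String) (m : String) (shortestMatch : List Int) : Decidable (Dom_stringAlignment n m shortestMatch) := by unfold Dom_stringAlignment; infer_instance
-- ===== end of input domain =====

-- B replaces A's per-position rescan of str2 by a per-character counter of eligible
-- indices built once (objective: faster — one pass over each string instead of a nested scan).

-- ===== PORT A =====
-- inner loop 'for j in range(len(str2)): if str1[i] == str2[j] and j not in usedChar and j in shortestMatch: append str2[j]; usedChar.add(j); break'
-- = find the first index–char pair of str2 satisfying the condition
def aStep (s2e : List (Int × Char)) (sm : List Int)
    (st : PySem.Set Int × List Char) (c : Char) : PySem.Set Int × List Char :=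
  match s2e.find? (fun p => p.2 == c && !(PySem.Set.contains st.1 p.1) && decide (p.1 ∈ sm)) with
  | some p => (PySem.Set.add st.1 p.1, st.2 ++ [p.2])
  | none   => (st.1, st.2 ++ ['_'])

def stringAlignment (n : String) (m : String) (shortestMatch : List Int) : String :=
  let str1 := if PySem.Str.len n ≥ PySem.Str.len m then n else m
  let str2 := if PySem.Str.len n ≥ PySem.Str.len m then m else n
  let st := (str1.toList.drop 1).foldl
      (aStep (PySem.List.enumerate str2.toList) shortestMatch) (PySem.Set.empty, [])
  String.mk (str1.toList ++ '\n' :: ' ' :: st.2)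

-- ===== PORT B =====
def bStep (st : PySem.Dict Char Int × List Char) (c : Char) : PySem.Dict Char Int × List Char :=
  if st.1.getD c 0 > 0 then (st.1.insert c (st.1.getD c 0 - 1), st.2 ++ [c])
  else (st.1, st.2 ++ ['_'])

def stringAlignment_alt (n : String) (m : String) (shortestMatch : List Int) : String :=
  let str1 := if PySem.Str.len n ≥ PySem.Str.len m then n else m
  let str2 := if PySem.Str.len n ≥ PySem.Str.len m then m else n
  let allowed := PySem.Set.ofList shortestMatch
  let avail := (PySem.List.enumerate str2.toList).foldl
      (fun d (p : Int × Char) =>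
        if PySem.Set.contains allowed p.1 then d.insert p.2 (d.getD p.2 0 + 1) else d)
      PySem.Dict.empty
  let st := (str1.toList.drop 1).foldl bStep (avail, [])
  String.mk (str1.toList ++ '\n' :: ' ' :: st.2)

-- ===== PRECONDITION & SPEC =====
def Spec_stringAlignment (n : String) (m : String) (shortestMatch : List Int) (out : String) : Prop := out = stringAlignment_alt n m shortestMatch
instance (n : String) (m : String) (shortestMatch : List Int) (out : String) : Decidable (Spec_stringAlignment n m shortestMatch out) := by unfold Spec_stringAlignment; infer_instance

-- ===== CLAIM (what is proved, stated in full; the proofs are below) =====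
def Claim_equal_stringAlignment : Prop := ∀ (n : String) (m : String) (shortestMatch : List Int), Dom_stringAlignment n m shortestMatch → Spec_stringAlignment n m shortestMatch (stringAlignment n m shortestMatch)

-- ===== LEMMAS AND PROOFS =====

-- number of still-eligible str2 positions carrying character c
def cnt (s2e : List (Int × Char)) (sm : List Int) (used : List Int) (c : Char) : Nat :=
  s2e.countP (fun p => p.2 == c && !(PySem.Set.contains used p.1) && decide (p.1 ∈ sm))

-- in a list with strictly increasing first components, a pair is determined by its first component
lemma fst_inj {l : List (Int × Char)} (hl : l.Pairwise (fun a b => a.1 < b.1))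
    {p q : Int × Char} (hp : p ∈ l) (hq : q ∈ l) (h : p.1 = q.1) : p = q := by
  induction l with
  | nil => cases hp
  | cons x t ih =>
    rcases List.pairwise_cons.mp hl with ⟨hx, ht⟩
    rcases List.mem_cons.mp hp with rfl | hp' <;> rcases List.mem_cons.mp hq with rfl | hq'
    · rfl
    · exact absurd h (ne_of_lt (hx _ hq'))
    · exact absurd h (ne_of_gt (hx _ hp'))
    · exact ih ht hp' hq'

-- removing one satisfying element (identified by its unique first component) drops the count by one
lemma countP_point {l : List (Int × Char)} (hl : l.Pairwise (fun a b => a.1 < b.1))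
    {p : Int × Char} (hp : p ∈ l) {P Q : Int × Char → Bool} (hPp : P p = true)
    (hPQ : ∀ q ∈ l, Q q = (P q && q.1 != p.1)) :
    l.countP P = l.countP Q + 1 := by
  induction l with
  | nil => cases hp
  | cons x t ih =>
    rcases List.pairwise_cons.mp hl with ⟨hx, ht⟩
    rcases List.mem_cons.mp hp with rfl | hp'
    · have hQx : Q p = false := by
        have h1 := hPQ p (List.mem_cons_self ..)
        simp [h1]
      have htQ : t.countP Q = t.countP P := by
        apply List.countP_congr
        intro q hq
        have h1 := hPQ q (List.mem_cons_of_mem _ hq)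
        have hne : q.1 ≠ p.1 := ne_of_gt (hx _ hq)
        simp [h1, hne]
      simp [hPp, hQx, htQ]
    · have hxP : Q x = P x := by
        have h1 := hPQ x (List.mem_cons_self ..)
        have hne : x.1 ≠ p.1 := ne_of_lt (hx _ hp')
        simp [h1, hne]
      have hrec := ih ht hp' (fun q hq => hPQ q (List.mem_cons_of_mem _ hq))
      simp [List.countP_cons, hxP, hrec]
      omega

-- membership in usedChar after adding one index
lemma contains_add_eq (used : PySem.Set Int) (x y : Int) :
    PySem.Set.contains (PySem.Set.add used x) y = (PySem.Set.contains used y || y == x) := by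
  rw [Bool.eq_iff_iff]
  simp [PySem.Set.mem_add, beq_iff_eq]

-- consuming an index of character c leaves every other character's count unchanged
lemma cnt_other {s2e : List (Int × Char)} (hl : s2e.Pairwise (fun a b => a.1 < b.1))
    {sm : List Int} {used : List Int} {p : Int × Char} (hp : p ∈ s2e)
    {c' : Char} (hpc : p.2 ≠ c') :
    cnt s2e sm (PySem.Set.add used p.1) c' = cnt s2e sm used c' := by
  unfold cnt
  apply List.countP_congr
  intro q hq
  by_cases h : q.1 = p.1
  · have hqp : q = p := fst_inj hl hq hp h
    subst hqp
    simp [hpc]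
  · simp [h]

-- one loop iteration: same appended character, and the counter invariant is preserved
lemma step_agree {s2e : List (Int × Char)} (hl : s2e.Pairwise (fun a b => a.1 < b.1))
    (sm : List Int) (used : PySem.Set Int) (avail : PySem.Dict Char Int) (acc : List Char) (c : Char)
    (hinv : ∀ c', avail.getD c' 0 = (cnt s2e sm used c' : Int)) :
    (bStep (avail, acc) c).2 = (aStep s2e sm (used, acc) c).2 ∧
    ∀ c', (bStep (avail, acc) c).1.getD c' 0 = (cnt s2e sm (aStep s2e sm (used, acc) c).1 c' : Int) := by
  cases hfind : s2e.find? (fun p => p.2 == c && !(PySem.Set.contains used p.1) && decide (p.1 ∈ sm)) with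
  | none =>
    have hz : cnt s2e sm used c = 0 := by
      apply List.countP_eq_zero.mpr
      intro q hq
      exact List.find?_eq_none.mp hfind q hq
    have hb : ¬ (avail.getD c 0 > 0) := by rw [hinv c, hz]; simp
    constructor
    · unfold bStep aStep
      rw [if_neg hb, hfind]
    · intro c'
      unfold bStep aStep
      rw [if_neg hb, hfind]
      exact hinv c'
  | some p =>
    have hPp := List.find?_some hfind
    have hpmem := List.mem_of_find?_eq_some hfind
    have hc2 : p.2 = c := by
      have h := hPp
      simp only [Bool.and_eq_true, beq_iff_eq] at h
      exact h.1.1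
    have hpos : 0 < cnt s2e sm used c := by
      apply List.countP_pos_iff.mpr
      exact ⟨p, hpmem, hPp⟩
    have hb : avail.getD c 0 > 0 := by rw [hinv c]; exact_mod_cast hpos
    have hdrop : cnt s2e sm used c = cnt s2e sm (PySem.Set.add used p.1) c + 1 := by
      unfold cnt
      apply countP_point hl hpmem hPp
      intro q hq
      simp only [contains_add_eq, Bool.not_or, bne]
      cases q.2 == c <;> cases PySem.Set.contains used q.1 <;> cases q.1 == p.1 <;> cases decide (q.1 ∈ sm) <;> rfl
    constructor
    · unfold bStep aStep
      rw [if_pos hb, hfind]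
      dsimp only
      rw [hc2]
    · intro c'
      unfold bStep aStep
      rw [if_pos hb, hfind]
      dsimp only
      by_cases hcc : c' = c
      · subst hcc
        show (avail.insert c' (avail.getD c' 0 - 1)).getD c' 0 = _
        rw [PySem.Dict.getD_insert_self, hinv c', hdrop]
        push_cast
        ring
      · have hpc : p.2 ≠ c' := by rw [hc2]; exact fun h => hcc h.symm
        show (avail.insert c (avail.getD c 0 - 1)).getD c' 0 = _
        rw [PySem.Dict.getD_insert_of_ne _ _ _ hcc, hinv c', cnt_other hl hpmem hpc]

-- the whole loop produces the same aligned character list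
lemma loop_agree {s2e : List (Int × Char)} (hl : s2e.Pairwise (fun a b => a.1 < b.1)) (sm : List Int) :
    ∀ (l : List Char) (used : PySem.Set Int) (avail : PySem.Dict Char Int) (acc : List Char),
    (∀ c', avail.getD c' 0 = (cnt s2e sm used c' : Int)) →
    (l.foldl bStep (avail, acc)).2 = (l.foldl (aStep s2e sm) (used, acc)).2 := by
  intro l
  induction l with
  | nil => intro used avail acc hinv; rfl
  | cons x t ih =>
    intro used avail acc hinv
    obtain ⟨h1, h2⟩ := step_agree hl sm used avail acc x hinv
    simp only [List.foldl_cons]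
    have hb : bStep (avail, acc) x = ((bStep (avail, acc) x).1, (aStep s2e sm (used, acc) x).2) := by
      rw [← h1]
    have ha : aStep s2e sm (used, acc) x
        = ((aStep s2e sm (used, acc) x).1, (aStep s2e sm (used, acc) x).2) := rfl
    rw [hb, ha]
    exact ih ((aStep s2e sm (used, acc) x).1) ((bStep (avail, acc) x).1) _ h2

-- the initial counter counts the eligible indices of each character
lemma init_getD (allowed : List Int) (c : Char) :
    ∀ (l : List (Int × Char)) (d : PySem.Dict Char Int),
    (l.foldl (fun d (p : Int × Char) =>
        if PySem.Set.contains allowed p.1 then d.insert p.2 (d.getD p.2 0 + 1) else d) d).getD c 0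
      = d.getD c 0 + (l.countP (fun p => PySem.Set.contains allowed p.1 && p.2 == c) : Int) := by
  intro l
  induction l with
  | nil => intro d; simp
  | cons p t ih =>
    intro d
    rw [List.foldl_cons, List.countP_cons]
    cases hc : PySem.Set.contains allowed p.1
    · rw [if_neg (fun hh => Bool.false_ne_true hh), ih]
      simp
    · rw [if_pos rfl, ih, PySem.Dict.getD_insert]
      simp only [Bool.true_and]
      by_cases h : c = p.2
      · rw [if_pos h, if_pos (by simp [h])]
        rw [h]
        push_cast
        ring
      · rw [if_neg h, if_neg (by simp only [beq_iff_eq]; exact fun hh => h hh.symm)]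
        push_cast
        ring

-- same strings, any shared str1/str2: the two computations agree
lemma main_agree (s1 s2 : List Char) (sm : List Int) :
    ((s1.drop 1).foldl bStep
        ((PySem.List.enumerate s2).foldl
          (fun d (p : Int × Char) =>
            if PySem.Set.contains (PySem.Set.ofList sm) p.1 then d.insert p.2 (d.getD p.2 0 + 1) else d)
          PySem.Dict.empty, [])).2
      = ((s1.drop 1).foldl (aStep (PySem.List.enumerate s2) sm) (PySem.Set.empty, [])).2 := by
  apply loop_agree (PySem.List.pairwise_lt_enumerate ..) sm
  intro c'
  rw [init_getD]
  have hcount : (PySem.List.enumerate s2).countP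
        (fun p => PySem.Set.contains (PySem.Set.ofList sm) p.1 && p.2 == c')
      = cnt (PySem.List.enumerate s2) sm PySem.Set.empty c' := by
    unfold cnt
    apply List.countP_congr
    intro q hq
    have h1 : PySem.Set.contains (PySem.Set.ofList sm) q.1 = decide (q.1 ∈ sm) := by
      rw [Bool.eq_iff_iff]
      simp [PySem.Set.mem_ofList]
    have h2 : PySem.Set.contains (PySem.Set.empty : PySem.Set Int) q.1 = false := by
      rw [PySem.Set.contains_eq_listContains]; rfl
    rw [h1, h2]
    cases q.2 == c' <;> cases decide (q.1 ∈ sm) <;> rfl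
  rw [hcount]
  simp

theorem stringAlignment_spec : Claim_equal_stringAlignment := by
  intro n m sm _
  unfold Spec_stringAlignment stringAlignment stringAlignment_alt
  simp only []
  congr 1
  rw [main_agree]
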